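-- pv_equiv track=rewrite | github.com/pralkarz/aoc2025 | day06/day06.py | part1
-- ===== SOURCE A (Python) =====
-- def part1(data):
--     data = data.split("\n")
--
--     numbers = data[1:-2]
--     operators = data[-2].split()
--
--     results = [int(n) for n in data[0].split()]
--     for line in numbers:
--         line = [int(n) for n in line.split()]
--         for idx, n in enumerate(line):
--             match operators[idx]:
--                 case "+":
--                     results[idx] += n
--                 case "*":
--                     results[idx] *= n
--
--     return sum(results)
-- ===== SOURCE B (Python) =====
-- def part1(data):
--     lines = data.split("\n")
--     rows = [[int(n) for n in line.split()] for line in lines[:-2]]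
--     operators = lines[-2].split()
--     total = 0
--     for op, col in zip(operators, zip(*rows)):
--         if op == "+":
--             total += sum(col)
--         else:
--             p = 1
--             for v in col:
--                 p *= v
--             total += p
--     return total
-- ===== Notes on version B (the rewrite author's own statement) =====
-- stated objective: idiomatic
-- what changed: B transposes the grid and reduces each column in one shot (sum for '+', product for '*') instead of threading a mutable per-column results vector through every row; this is valid because + and * are associative.
-- outside the precondition, e.g. on part1('2 3\n4 5\n+ -\n'): A returns 9, B returns 21; on part1('1 2\n3\n+ +\n'): A returns 6, B returns 4; on part1('3 4\n'): A returns 7, B returns 0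
import Mathlib
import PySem

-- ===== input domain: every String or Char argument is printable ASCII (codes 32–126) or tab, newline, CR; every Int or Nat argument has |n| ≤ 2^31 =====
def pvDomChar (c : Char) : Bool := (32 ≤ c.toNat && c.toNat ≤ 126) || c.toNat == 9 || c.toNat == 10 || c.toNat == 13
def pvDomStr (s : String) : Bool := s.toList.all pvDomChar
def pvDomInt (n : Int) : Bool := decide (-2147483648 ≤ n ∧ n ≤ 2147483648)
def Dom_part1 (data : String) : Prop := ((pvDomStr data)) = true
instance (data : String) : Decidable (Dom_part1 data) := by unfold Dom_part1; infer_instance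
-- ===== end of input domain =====

-- B reduces each column of the transposed grid in one shot (sum for '+', product for '*')
-- instead of threading a per-column results vector through every row; same cost, more idiomatic.

-- ===== PORT A =====
-- int(n) for a token; total form, used only under Pre_ (every token parses)
def pvInt (t : String) : Int := (PySem.Int.ofStr? t).getD 0

-- [int(n) for n in line.split()]
def pvParse (line : String) : List Int := (PySem.Str.split₀ line).map pvInt

-- body of A's inner loop: match operators[idx] / results[idx] += n / results[idx] *= n
def pvUpd (operators : List String) (res : List Int) (p : Int × Int) : List Int :=
  let op := PySem.List.pyGetD operators p.1 ""
  if op == "+" then PySem.List.pySetD res p.1 (PySem.List.pyGetD res p.1 0 + p.2)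
  else if op == "*" then PySem.List.pySetD res p.1 (PySem.List.pyGetD res p.1 0 * p.2)
  else res

def part1 (data : String) : Int :=
  let lines := (PySem.Str.split? data "\n").getD []
  let numbers := PySem.List.slice lines (some 1) (some (-2))
  let operators := PySem.Str.split₀ (PySem.List.pyGetD lines (-2) "")
  let results := pvParse (PySem.List.pyGetD lines 0 "")
  let final := numbers.foldl
    (fun results line => (PySem.List.enumerate (pvParse line) 0).foldl (pvUpd operators) results)
    results
  final.sum

-- ===== PORT B =====
-- zip(*rows): list of columns, truncated to the shortest row (Python zip semantics)
def pvZipStar (rows : List (List Int)) : List (List Int) :=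
  (List.range ((rows.map List.length).min?.getD 0)).map
    (fun i => rows.map (fun r => r.getD i 0))

def part1_alt (data : String) : Int :=
  let lines := (PySem.Str.split? data "\n").getD []
  let rows := (PySem.List.slice lines none (some (-2))).map pvParse
  let operators := PySem.Str.split₀ (PySem.List.pyGetD lines (-2) "")
  (operators.zip (pvZipStar rows)).foldl
    (fun total oc => total + (if oc.1 == "+" then oc.2.sum else oc.2.foldl (· * ·) 1)) 0

-- ===== PRECONDITION & SPEC =====
-- Pre_ excludes (a) inputs with fewer than 3 '\n'-separated lines or unparsable number tokens,
-- where A raises (IndexError/ValueError) or accidentally reads the operator line as numbers;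
-- (b) ragged grids, where A skips missing cells while zip truncates columns; (c) operator
-- tokens other than '+'/'*', which A silently ignores — all unspecified corners of the puzzle format.
def Pre_part1 (data : String) : Prop :=
  let lines := (PySem.Str.split? data "\n").getD []
  let operators := PySem.Str.split₀ (PySem.List.pyGetD lines (-2) "")
  let L := (PySem.Str.split₀ (lines.headD "")).length
  (3 ≤ lines.length ∧
    (∀ l ∈ lines.take (lines.length - 2),
        (PySem.Str.split₀ l).length = L ∧
        ∀ t ∈ PySem.Str.split₀ l, (PySem.Int.ofStr? t).isSome = true) ∧
    L ≤ operators.length ∧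
    (∀ op ∈ operators.take L, op = "+" ∨ op = "*")) ∨
  (lines.length = 2 ∧ (PySem.Str.split₀ (lines.headD "")).length = 0)
instance (data : String) : Decidable (Pre_part1 data) := by unfold Pre_part1; infer_instance

def pvWitness_part1 : String := "1 2\n3 4\n+ *\n"

def Spec_part1 (data : String) (out : Int) : Prop := out = part1_alt data
instance (data : String) (out : Int) : Decidable (Spec_part1 data out) := by unfold Spec_part1; infer_instance

-- ===== CLAIM (what is proved, stated in full; the proofs are below) =====
def Claim_equal_part1 : Prop := ∀ (data : String), Dom_part1 data → Pre_part1 data → Spec_part1 data (part1 data)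

-- ===== LEMMAS AND PROOFS =====

-- proof-side helpers: one column step and one whole-column fold
def pvApplyOp (op : String) (r n : Int) : Int :=
  if op == "+" then r + n else if op == "*" then r * n else r

def pvColFold (op : String) (x : Int) (col : List Int) : Int := col.foldl (pvApplyOp op) x

def pvZipApply : List String → List Int → List Int → List Int
  | _, [], res => res
  | _, _ :: _, [] => []
  | os, n :: ns, r :: rs => pvApplyOp (os.headD "") r n :: pvZipApply os.tail ns rs

theorem pvGetD_drop_headD (os : List String) (k : Nat) :
    os.getD k "" = (os.drop k).headD "" := by
  induction os generalizing k with
  | nil => simp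
  | cons o os ih => cases k with
    | zero => simp
    | succ k => simpa using ih k

theorem pvGetD_append_cons (done : List Int) (r : Int) (rs : List Int) :
    (done ++ r :: rs).getD done.length 0 = r := by
  induction done with
  | nil => simp
  | cons d ds ih => simpa using ih

theorem pvSet_append_cons (done : List Int) (r v : Int) (rs : List Int) :
    (done ++ r :: rs).set done.length v = done ++ v :: rs := by
  induction done with
  | nil => simp
  | cons d ds ih => simpa using ih

theorem pvStep_eq (ops : List String) (nums : List Int) :
    ∀ (done rest : List Int), nums.length ≤ rest.length →
    (PySem.List.enumerate nums (done.length : Int)).foldl (pvUpd ops) (done ++ rest)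
      = done ++ pvZipApply (ops.drop done.length) nums rest := by
  induction nums with
  | nil => intro done rest _; simp [PySem.List.enumerate, pvZipApply]
  | cons n ns ih =>
    intro done rest hlen
    cases rest with
    | nil => simp at hlen
    | cons r rs =>
      rw [PySem.List.enumerate_cons, List.foldl_cons]
      have hupd : pvUpd ops (done ++ r :: rs) ((done.length : Int), n)
          = done ++ pvApplyOp ((ops.drop done.length).headD "") r n :: rs := by
        simp only [pvUpd, PySem.List.pyGetD_natCast, PySem.List.pySetD_natCast,
          pvGetD_append_cons, pvSet_append_cons, pvApplyOp, ← pvGetD_drop_headD]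
        split_ifs <;> rfl
      rw [hupd]
      have hcast : ((done.length : Int) + 1) = (((done ++ [pvApplyOp ((ops.drop done.length).headD "") r n]).length : Nat) : Int) := by
        simp
      have hflat : done ++ pvApplyOp ((ops.drop done.length).headD "") r n :: rs
          = (done ++ [pvApplyOp ((ops.drop done.length).headD "") r n]) ++ rs := by
        simp
      rw [hcast, hflat, ih _ rs (by simpa using hlen)]
      simp only [List.length_append, List.length_cons, List.length_nil,
        List.drop_add_one_eq_tail_drop]
      simp [pvZipApply]

theorem pvStep_eq0 (ops : List String) (nums res : List Int) (h : nums.length ≤ res.length) :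
    (PySem.List.enumerate nums (0 : Int)).foldl (pvUpd ops) res = pvZipApply ops nums res := by
  simpa using pvStep_eq ops nums [] res h

theorem pvZipApply_length (os : List String) (nums : List Int) :
    ∀ (res : List Int), nums.length ≤ res.length →
    (pvZipApply os nums res).length = res.length := by
  induction nums generalizing os with
  | nil => intro res _; rfl
  | cons n ns ih =>
    intro res hlen
    cases res with
    | nil => simp at hlen
    | cons r rs => simp only [pvZipApply, List.length_cons]; rw [ih os.tail rs (by simpa using hlen)]

theorem pvZipApply_getD (os : List String) (nums : List Int) :
    ∀ (res : List Int) (i : Nat), nums.length = res.length →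
    (pvZipApply os nums res).getD i 0
      = pvApplyOp (os.getD i "") (res.getD i 0) (nums.getD i 0) := by
  induction nums generalizing os with
  | nil =>
    intro res i hlen
    have : res = [] := List.eq_nil_of_length_eq_zero hlen.symm
    subst this
    simp only [pvZipApply, List.getD_nil, pvApplyOp]
    split_ifs <;> ring
  | cons n ns ih =>
    intro res i hlen
    cases res with
    | nil => simp at hlen
    | cons r rs =>
      cases i with
      | zero =>
        simp only [pvZipApply, List.getD_cons_zero]
        congr 1
        cases os <;> rfl
      | succ i =>
        simp only [pvZipApply, List.getD_cons_succ]
        rw [ih os.tail rs i (by simpa using hlen)]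
        congr 1
        cases os <;> rfl

theorem pvFoldA (ops : List String) (tail : List (List Int)) :
    ∀ (res : List Int), (∀ r ∈ tail, r.length = res.length) →
    tail.foldl (fun acc nums => (PySem.List.enumerate nums (0 : Int)).foldl (pvUpd ops) acc) res
      = (List.range res.length).map
          (fun i => pvColFold (ops.getD i "") (res.getD i 0) (tail.map (fun r => r.getD i 0))) := by
  induction tail with
  | nil =>
    intro res _
    apply List.ext_getElem (by simp)
    intro j h1 h2
    have hj : j < res.length := by simpa using h2
    simp [pvColFold, List.getElem?_eq_getElem hj]
  | cons nums tail ih =>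
    intro res hall
    have hlen : nums.length = res.length := hall nums (by simp)
    rw [List.foldl_cons, pvStep_eq0 ops nums res (le_of_eq hlen),
        ih _ (by
          intro r hr
          rw [pvZipApply_length ops nums res (le_of_eq hlen)]
          exact hall r (by simp [hr])),
        pvZipApply_length ops nums res (le_of_eq hlen)]
    apply List.map_congr_left
    intro i hi
    rw [pvZipApply_getD ops nums res i hlen]
    simp [pvColFold, pvApplyOp]

theorem pvColFold_plus (c : List Int) : ∀ (x : Int), pvColFold "+" x c = x + c.sum := by
  induction c with
  | nil => intro x; simp [pvColFold]
  | cons n c ih =>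
    intro x
    simp only [pvColFold, List.foldl_cons, List.sum_cons] at *
    rw [ih]
    simp [pvApplyOp]
    ring

theorem pvFoldl_mul_one (c : List Int) : ∀ (a : Int), c.foldl (· * ·) a = a * c.foldl (· * ·) 1 := by
  induction c with
  | nil => intro a; simp
  | cons n c ih =>
    intro a
    simp only [List.foldl_cons]
    rw [ih (a * n), ih (1 * n)]
    ring

theorem pvColFold_star (c : List Int) : ∀ (x : Int), pvColFold "*" x c = x * c.foldl (· * ·) 1 := by
  induction c with
  | nil => intro x; simp [pvColFold]
  | cons n c ih =>
    intro x
    simp only [pvColFold, List.foldl_cons] at *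
    rw [ih, pvFoldl_mul_one c (1 * n)]
    simp [pvApplyOp]
    ring

theorem pvMin_replicate (n m : Nat) : (List.replicate (n + 1) m).min? = some m := by
  induction n with
  | zero => simp [List.min?_cons]
  | succ n ih => rw [List.replicate_succ, List.min?_cons, ih]; simp

-- ===== VERDICT (by name: the statement is the Claim_ definition above) =====
theorem part1_spec : Claim_equal_part1 := by
  unfold Claim_equal_part1
  intro data _ hpre
  unfold Pre_part1 at hpre
  unfold Spec_part1 part1 part1_alt
  rcases hpre with ⟨h3, hrows, hLm, hops⟩ | ⟨h2, hblank⟩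
  case inr =>
    -- degenerate two-line input with a blank first line: both sides compute 0
    obtain ⟨l0, l1, hL⟩ : ∃ l0 l1, (PySem.Str.split? data "\n").getD [] = [l0, l1] := by
      cases h : (PySem.Str.split? data "\n").getD [] with
      | nil => rw [h] at h2; simp at h2
      | cons a b =>
        cases b with
        | nil => rw [h] at h2; simp at h2
        | cons c d =>
          cases d with
          | nil => exact ⟨a, c, rfl⟩
          | cons e f => rw [h] at h2; simp at h2
    rw [hL] at hblank ⊢
    have hb : PySem.Str.split₀ l0 = [] := by
      simpa using List.eq_nil_of_length_eq_zero (by simpa using hblank)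
    simp [PySem.List.slice, PySem.List.clampIdx, pvParse, hb, pvZipStar,
      PySem.List.pyGetD_zero_cons]
  obtain ⟨l0, rest, hL⟩ : ∃ l0 rest, (PySem.Str.split? data "\n").getD [] = l0 :: rest := by
    cases h : (PySem.Str.split? data "\n").getD [] with
    | nil => rw [h] at h3; simp at h3
    | cons a b => exact ⟨a, b, rfl⟩
  rw [hL] at h3 hrows hops hLm ⊢
  simp only [List.length_cons, List.headD_cons] at h3 hrows hLm hops ⊢
  have hA : PySem.List.slice (l0 :: rest) (some 1) (some (-2)) = rest.take (rest.length - 2) := by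
    have hc1 : PySem.List.clampIdx (rest.length + 1) 1 = 1 := by
      rw [show (1 : Int) = ((1 : Nat) : Int) by norm_num, PySem.List.clampIdx_natCast]
      simp
    have hc2 : PySem.List.clampIdx (rest.length + 1) (-2) = rest.length + 1 - 2 :=
      PySem.List.clampIdx_neg_ofNat _ 2 (by norm_num)
    simp only [PySem.List.slice, List.length_cons, hc1, hc2, List.drop_one, List.tail_cons]
    congr 1
  have hB : PySem.List.slice (l0 :: rest) none (some (-2)) = l0 :: rest.take (rest.length - 2) := by
    rw [PySem.List.slice_to_neg_ofNat _ 2 (by norm_num)]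
    simp only [List.length_cons]
    rw [show rest.length + 1 - 2 = (rest.length - 2) + 1 by omega]
    simp
  rw [hA, hB]
  set ops := PySem.Str.split₀ (PySem.List.pyGetD (l0 :: rest) (-2) "") with hopsdef
  set tailS := List.take (rest.length - 2) rest with htailS
  have hget0 : PySem.List.pyGetD (l0 :: rest) 0 "" = l0 := PySem.List.pyGetD_zero_cons _ _ _
  rw [hget0]
  have hres0len : (pvParse l0).length = (PySem.Str.split₀ l0).length := by
    simp [pvParse]
  have htlen : ∀ r ∈ tailS.map pvParse, r.length = (pvParse l0).length := by
    intro r hr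
    obtain ⟨l, hl, rfl⟩ := List.mem_map.1 hr
    have hmem : l ∈ List.take (rest.length + 1 - 2) (l0 :: rest) := by
      rw [show rest.length + 1 - 2 = (rest.length - 2) + 1 by omega, List.take_succ_cons]
      exact List.mem_cons_of_mem _ hl
    have := (hrows l hmem).1
    rw [hres0len]
    simpa [pvParse] using this
  have hmap : List.foldl
        (fun results line => List.foldl (pvUpd ops) results (PySem.List.enumerate (pvParse line)))
        (pvParse l0) tailS
      = List.foldl (fun acc nums => List.foldl (pvUpd ops) acc (PySem.List.enumerate nums))
        (pvParse l0) (tailS.map pvParse) :=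
    (List.foldl_map (f := pvParse)
      (g := fun acc nums => List.foldl (pvUpd ops) acc (PySem.List.enumerate nums))
      (l := tailS) (init := pvParse l0)).symm
  rw [hmap, pvFoldA ops (tailS.map pvParse) (pvParse l0) htlen]
  simp only [List.map_cons]
  have hzipstar : pvZipStar (pvParse l0 :: tailS.map pvParse)
      = (List.range (PySem.Str.split₀ l0).length).map
          (fun i => (pvParse l0 :: tailS.map pvParse).map (fun r => r.getD i 0)) := by
    unfold pvZipStar
    have hrep : ((pvParse l0 :: tailS.map pvParse).map List.length)
        = List.replicate ((tailS.map pvParse).length + 1) (PySem.Str.split₀ l0).length := by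
      rw [List.eq_replicate_iff]
      refine ⟨by simp, ?_⟩
      intro b hb
      simp only [List.map_cons, List.mem_cons] at hb
      rcases hb with rfl | hb
      · exact hres0len
      · obtain ⟨r, hr, rfl⟩ := List.mem_map.1 hb
        rw [htlen r hr, hres0len]
    rw [hrep, pvMin_replicate]
    rfl
  have hzip : ops.zip ((List.range (PySem.Str.split₀ l0).length).map
        (fun i => (pvParse l0 :: tailS.map pvParse).map (fun r => r.getD i 0)))
      = (List.range (PySem.Str.split₀ l0).length).map
          (fun i => (ops.getD i "", (pvParse l0 :: tailS.map pvParse).map (fun r => r.getD i 0))) := by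
    apply List.ext_getElem (by simp [Nat.min_eq_right hLm])
    intro j h1 h2
    have hj : j < ops.length := lt_of_lt_of_le (by simpa using h2) hLm
    simp only [List.getElem_zip, List.getElem_map, List.getElem_range]
    rw [List.getD_eq_getElem ops "" hj]
  rw [hzipstar, hzip, PySem.List.foldl_add, List.map_map, zero_add, hres0len]
  refine congrArg List.sum (List.map_congr_left ?_)
  intro i hi
  have hiL : i < (PySem.Str.split₀ l0).length := List.mem_range.mp hi
  have hi' : i < ops.length := lt_of_lt_of_le hiL hLm
  have hopi : ops.getD i "" = "+" ∨ ops.getD i "" = "*" := by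
    refine hops _ ?_
    rw [List.getD_eq_getElem ops "" hi']
    have htk : (List.take (PySem.Str.split₀ l0).length ops)[i]'(by simp [Nat.min_eq_right hLm]; exact ⟨hiL, hi'⟩) = ops[i]'hi' := List.getElem_take
    rw [← htk]
    exact List.getElem_mem _
  simp only [Function.comp_apply, List.map_cons]
  rcases hopi with h | h <;> rw [h]
  · simp [pvColFold_plus, List.sum_cons]
  · rw [pvColFold_star]
    simp only [show (("*" : String) == "+") = false from by decide, Bool.false_eq_true, if_false,
      List.foldl_cons]
    rw [pvFoldl_mul_one _ (1 * ((pvParse l0).getD i 0))]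
    ring
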